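-- pv_equiv track=rewrite | github.com/kyle0527/BioNeuronai | src/bioneuronai/trading/pretrade_automation.py | _analyze_main_trend
-- ===== SOURCE A (Python) =====
-- from typing import Dict, List, Optional, Tuple, Any
--
-- def _analyze_main_trend(data: Dict) -> str:
--     """分析主要趨勢"""
--     # 簡單的趨勢分析邏輯
--     timeframes = data.get("timeframes", {})
--     bullish_count: int = sum(1 for trend in timeframes.values() if trend == "BULLISH")
--     bearish_count: int = sum(1 for trend in timeframes.values() if trend == "BEARISH")
--
--     if bullish_count > bearish_count:
--         return "上升趨勢"
--     elif bearish_count > bullish_count: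
--         return "下降趨勢"
--     else:
--         return "震盪整理"
-- ===== SOURCE B (Python) =====
-- def _analyze_main_trend(data):
--     """分析主要趨勢 — Boyer–Moore pairwise-cancellation vote.
--
--     Maintains a (candidate, count) pair: each BULLISH/BEARISH vote either
--     backs the current candidate or cancels one of its votes; with only two
--     voting symbols the surviving candidate/count are exact, so the final
--     state decides the label directly. Other values cast no vote.
--     """
--     cand, cnt = None, 0
--     for trend in data.get("timeframes", {}).values():
--         if trend != "BULLISH" and trend != "BEARISH":
--             continue
--         if cnt == 0:
--             cand, cnt = trend, 1
--         elif trend == cand: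
--             cnt += 1
--         else:
--             cnt -= 1
--     if cnt == 0:
--         return "震盪整理"
--     return "上升趨勢" if cand == "BULLISH" else "下降趨勢"
-- ===== Notes on version B (the rewrite author's own statement) =====
-- stated objective: alternative
-- what changed: Replaces the two counting passes and count comparison with a Boyer-Moore majority-vote state machine: a single (candidate, count) pair where each BULLISH/BEARISH value either reinforces or cancels the current candidate, and the surviving candidate/count decide the label (exact because only two symbols vote, so cancellation preserves the signed difference).
import Mathlib
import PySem

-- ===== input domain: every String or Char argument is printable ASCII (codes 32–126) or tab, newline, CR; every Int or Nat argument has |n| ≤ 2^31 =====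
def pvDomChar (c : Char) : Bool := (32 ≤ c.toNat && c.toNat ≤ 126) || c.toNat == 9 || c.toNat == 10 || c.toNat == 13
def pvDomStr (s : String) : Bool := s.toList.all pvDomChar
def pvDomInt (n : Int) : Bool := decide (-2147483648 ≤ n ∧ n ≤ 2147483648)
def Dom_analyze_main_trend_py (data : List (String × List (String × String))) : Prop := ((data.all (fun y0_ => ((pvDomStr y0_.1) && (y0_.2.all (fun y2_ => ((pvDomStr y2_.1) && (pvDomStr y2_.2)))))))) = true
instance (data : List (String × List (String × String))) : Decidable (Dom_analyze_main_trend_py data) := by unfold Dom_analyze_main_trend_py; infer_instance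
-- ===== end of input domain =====

-- B replaces A's two counting passes with a Boyer–Moore pairwise-cancellation vote (candidate+count state machine); proved equal on all inputs (alternative algorithm, same cost).


-- ===== PORT A =====
-- literal port of A: two 0/1-sum passes over timeframes.values(), then compare the counts
def analyze_main_trend_py (data : List (String × List (String × String))) : String :=
  let timeframes := (PySem.Dict.mk data).getD "timeframes" []
  let bullish_count : Int :=
    ((PySem.Dict.mk timeframes).values.map (fun trend => if trend == "BULLISH" then (1 : Int) else 0)).sum
  let bearish_count : Int :=
    ((PySem.Dict.mk timeframes).values.map (fun trend => if trend == "BEARISH" then (1 : Int) else 0)).sum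
  if bullish_count > bearish_count then "上升趨勢"
  else if bearish_count > bullish_count then "下降趨勢"
  else "震盪整理"

-- ===== PORT B =====
-- one Boyer–Moore voting step: a non-vote leaves the state; a vote either seeds,
-- reinforces, or cancels the current candidate
def bmStep (s : Option String × Int) (trend : String) : Option String × Int :=
  if trend != "BULLISH" && trend != "BEARISH" then s
  else if s.2 == 0 then (some trend, 1)
  else if some trend == s.1 then (s.1, s.2 + 1)
  else (s.1, s.2 - 1)

-- literal port of B: fold the voting step over the values, decide from the final state
def analyze_main_trend_py_alt (data : List (String × List (String × String))) : String :=
  let s := ((PySem.Dict.mk ((PySem.Dict.mk data).getD "timeframes" [])).values).foldl bmStep (none, 0)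
  if s.2 == 0 then "震盪整理"
  else if s.1 == some "BULLISH" then "上升趨勢" else "下降趨勢"

-- ===== PRECONDITION & SPEC =====
def Spec_analyze_main_trend_py (data : List (String × List (String × String))) (out : String) : Prop := out = analyze_main_trend_py_alt data
instance (data : List (String × List (String × String))) (out : String) : Decidable (Spec_analyze_main_trend_py data out) := by unfold Spec_analyze_main_trend_py; infer_instance

-- ===== CLAIM (what is proved, stated in full; the proofs are below) =====
def Claim_equal_analyze_main_trend_py : Prop := ∀ (data : List (String × List (String × String))), Dom_analyze_main_trend_py data → Spec_analyze_main_trend_py data (analyze_main_trend_py data)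

-- ===== LEMMAS AND PROOFS =====

-- signed value carried by a Boyer–Moore state
def bmVal (s : Option String × Int) : Int :=
  if s.1 == some "BULLISH" then s.2 else if s.1 == some "BEARISH" then -s.2 else 0

-- reachable-state invariant
def bmInv (s : Option String × Int) : Prop :=
  0 ≤ s.2 ∧ (s.2 = 0 ∨ s.1 = some "BULLISH" ∨ s.1 = some "BEARISH")

-- net score of a list of values
def netOf (l : List String) : Int :=
  (l.map (fun t => if t == "BULLISH" then (1 : Int) else 0)).sum
    - (l.map (fun t => if t == "BEARISH" then (1 : Int) else 0)).sum

lemma bm_fold (l : List String) : ∀ s, bmInv s →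
    bmInv (l.foldl bmStep s) ∧ bmVal (l.foldl bmStep s) = bmVal s + netOf l := by
  induction l with
  | nil => intro s hs; simpa [netOf] using hs
  | cons h t ih =>
    rintro ⟨c, n⟩ ⟨h0, hc⟩
    have step : bmInv (bmStep (c, n) h) ∧ bmVal (bmStep (c, n) h) = bmVal (c, n) +
        ((if h == "BULLISH" then (1 : Int) else 0) - (if h == "BEARISH" then (1 : Int) else 0)) := by
      by_cases hb : h = "BULLISH" <;> by_cases hr : h = "BEARISH" <;>
        by_cases hz : n = 0 <;> rcases hc with hc | hc | hc <;>
        simp_all [bmStep, bmInv, bmVal] <;> omega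
    obtain ⟨si, sv⟩ := step
    obtain ⟨ri, rv⟩ := ih _ si
    refine ⟨by simpa using ri, ?_⟩
    simp only [List.foldl_cons] at *
    rw [rv, sv]
    simp [netOf]
    ring

-- ===== VERDICT (by name: the statement is the Claim_ definition above) =====
theorem analyze_main_trend_py_spec : Claim_equal_analyze_main_trend_py := by
  intro data _
  unfold Spec_analyze_main_trend_py analyze_main_trend_py analyze_main_trend_py_alt
  dsimp only
  set l := (PySem.Dict.mk ((PySem.Dict.mk data).getD "timeframes" [])).values with hl
  obtain ⟨⟨h0, hc⟩, hv⟩ := bm_fold l (none, 0) (by simp [bmInv])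
  set s := l.foldl bmStep (none, 0) with hs
  set bull := (l.map (fun trend => if trend == "BULLISH" then (1 : Int) else 0)).sum with hbull
  set bear := (l.map (fun trend => if trend == "BEARISH" then (1 : Int) else 0)).sum with hbear
  have hval : bmVal s = bull - bear := by
    rw [hv]; simp [bmVal, netOf, hbull, hbear]
  rcases hc with hz | hb | hr
  · have h1 : bmVal s = 0 := by unfold bmVal; split_ifs <;> omega
    have hbe : bull = bear := by omega
    simp [hz, hbe]
  · by_cases hz : s.2 = 0
    · have h1 : bmVal s = 0 := by unfold bmVal; split_ifs <;> omega
      have hbe : bull = bear := by omega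
      simp [hz, hbe]
    · have h1 : bmVal s = s.2 := by unfold bmVal; simp [hb]
      have hgt : bear < bull := by omega
      have hA : ¬ bull < bear := by omega
      simp [hz, hb, hgt, hA]
  · by_cases hz : s.2 = 0
    · have h1 : bmVal s = 0 := by unfold bmVal; split_ifs <;> omega
      have hbe : bull = bear := by omega
      simp [hz, hbe]
    · have h1 : bmVal s = -s.2 := by unfold bmVal; simp [hr]
      have hlt : bull < bear := by omega
      have hA : ¬ bear < bull := by omega
      simp [hz, hr, hlt, hA]
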